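-- pv_equiv track=rewrite | github.com/ashroy6/infrarag | backend/app/ingest.py | chunk_yaml
-- ===== SOURCE A (Python) =====
-- MAX_CHUNK_SIZE = 1800
--
-- FALLBACK_CHUNK_SIZE = 1200
--
-- CHUNK_OVERLAP = 150
--
-- def fixed_chunk_text(text: str, chunk_size: int = FALLBACK_CHUNK_SIZE, overlap: int = CHUNK_OVERLAP):
--     text = text.strip()
--     if not text:
--         return []
--
--     chunks = []
--     start = 0
--     text_len = len(text)
--
--     while start < text_len:
--         end = min(start + chunk_size, text_len)
--         chunk = text[start:end].strip()
--         if chunk: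
--             chunks.append(chunk)
--
--         if end >= text_len:
--             break
--
--         start = max(end - overlap, 0)
--
--     return chunks
--
-- def split_large_chunks(chunks, max_size: int = MAX_CHUNK_SIZE):
--     final_chunks = []
--
--     for chunk in chunks:
--         chunk = chunk.strip()
--         if not chunk:
--             continue
--
--         if len(chunk) <= max_size:
--             final_chunks.append(chunk)
--         else:
--             final_chunks.extend(fixed_chunk_text(chunk))
--
--     return final_chunks
--
-- def chunk_yaml(text: str):
--     lines = text.splitlines()
--     chunks = []
--     current = []
--
--     for line in lines:
--         stripped = line.strip()
--         is_top_level_key = (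
--             line
--             and not line.startswith((" ", "\t"))
--             and stripped.endswith(":")
--             and not stripped.startswith("-")
--         )
--
--         if is_top_level_key and current:
--             chunks.append("\n".join(current).strip())
--             current = [line]
--         else:
--             current.append(line)
--
--     if current:
--         chunks.append("\n".join(current).strip())
--
--     return split_large_chunks(chunks)
-- ===== SOURCE B (Python) =====
-- MAX_CHUNK_SIZE = 1800
--
-- FALLBACK_CHUNK_SIZE = 1200
--
-- CHUNK_OVERLAP = 150
--
--
-- def _is_top_key(line):
--     s = line.strip()
--     return bool(line) and not line.startswith((" ", "\t")) and s.endswith(":") and not s.startswith("-")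
--
--
-- def _fixed_chunks(text, size=FALLBACK_CHUNK_SIZE, overlap=CHUNK_OVERLAP):
--     # closed-form window starts instead of a while loop
--     text = text.strip()
--     if not text:
--         return []
--     step = size - overlap
--     starts = range(0, max(len(text) - overlap, 1), step)
--     pieces = (text[s:s + size].strip() for s in starts)
--     return [p for p in pieces if p]
--
--
-- def chunk_yaml(text):
--     lines = text.splitlines()
--     n = len(lines)
--     breaks = [i for i, line in enumerate(lines) if i > 0 and _is_top_key(line)]
--     bounds = [0] + breaks + [n]
--     segments = ["\n".join(lines[a:b]).strip() for a, b in zip(bounds, bounds[1:])]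
--     out = []
--     for seg in segments:
--         if not seg:
--             continue
--         if len(seg) <= MAX_CHUNK_SIZE:
--             out.append(seg)
--         else:
--             out.extend(_fixed_chunks(seg))
--     return out
-- ===== Notes on version B (the rewrite author's own statement) =====
-- stated objective: alternative
-- what changed: Replaces the accumulate-into-current-and-flush loop by computing the list of top-level-key break indices and slicing the line list at them, and replaces the overlapping-window while loop of fixed_chunk_text by a closed-form range of window start offsets.
import Mathlib
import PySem

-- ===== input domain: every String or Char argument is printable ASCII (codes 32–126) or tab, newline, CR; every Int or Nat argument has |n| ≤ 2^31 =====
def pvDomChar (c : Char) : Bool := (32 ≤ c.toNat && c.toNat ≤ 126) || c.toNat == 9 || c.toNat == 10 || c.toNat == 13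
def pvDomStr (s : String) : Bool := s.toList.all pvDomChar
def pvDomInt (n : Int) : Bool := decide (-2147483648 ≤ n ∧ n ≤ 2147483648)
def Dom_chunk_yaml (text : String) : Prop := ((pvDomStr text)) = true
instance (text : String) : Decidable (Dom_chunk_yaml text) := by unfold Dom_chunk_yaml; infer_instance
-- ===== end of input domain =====

-- B re-implements chunk_yaml by computing break indices and slicing (and closed-form window
-- starts instead of the overlapping-window while loop); same return value, no side effects.

-- ===== PORT A =====
-- while loop of fixed_chunk_text (chunk_size = 1200, overlap = 150, the defaults it is called
-- with); Nat subtraction `e - 150` is exactly Python's `max(end - overlap, 0)`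
def pvFixedLoopA (t : String) (L start : Nat) (acc : List String) : List String :=
  let chunk := PySem.Str.strip (PySem.Str.slice t (some (start : Int)) (some ((min (start + 1200) L : Nat) : Int)))
  let acc' := if chunk = "" then acc else acc ++ [chunk]
  if L ≤ min (start + 1200) L then acc'
  else pvFixedLoopA t L (min (start + 1200) L - 150) acc'
termination_by L - start
decreasing_by omega

def fixed_chunk_textA (text : String) : List String :=
  let t := PySem.Str.strip text
  if t = "" then []
  else pvFixedLoopA t (PySem.Str.len t).toNat 0 []   -- text_len = len(text) (≥ 0, kept as Nat)

def split_large_chunksA (chunks : List String) : List String :=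
  chunks.foldl (fun final chunk =>
    let c := PySem.Str.strip chunk
    if c = "" then final
    else if PySem.Str.len c ≤ 1800 then final ++ [c]
    else final ++ fixed_chunk_textA c) []

def chunk_yaml (text : String) : List String :=
  let lines := PySem.Str.splitlines text
  let st := lines.foldl (fun (st : List String × List String) line =>
    let stripped := PySem.Str.strip line
    if (decide (line ≠ "") && !(PySem.Str.startswith line " " || PySem.Str.startswith line "\t")
        && PySem.Str.endswith stripped ":" && !(PySem.Str.startswith stripped "-"))
       && !st.2.isEmpty then
      (st.1 ++ [PySem.Str.strip (PySem.Str.join "\n" st.2)], [line])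
    else
      (st.1, st.2 ++ [line])) (([], []) : List String × List String)
  let chunks := if !st.2.isEmpty then st.1 ++ [PySem.Str.strip (PySem.Str.join "\n" st.2)] else st.1
  split_large_chunksA chunks

-- ===== PORT B =====
def isTopKeyB (line : String) : Bool :=
  let s := PySem.Str.strip line
  decide (line ≠ "") && !(PySem.Str.startswith line " " || PySem.Str.startswith line "\t")
    && PySem.Str.endswith s ":" && !(PySem.Str.startswith s "-")

-- closed-form window starts: range(0, max(len(text)-overlap, 1), size-overlap)
def fixedChunksB (text : String) : List String :=
  let t := PySem.Str.strip text
  if t = "" then []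
  else
    ((PySem.List.pyRange 0 (max (PySem.Str.len t - 150) 1) 1050).map
      (fun s => PySem.Str.strip (PySem.Str.slice t (some s) (some (s + 1200))))).filter
      (fun p => decide (p ≠ ""))

def chunk_yaml_alt (text : String) : List String :=
  let lines := PySem.Str.splitlines text
  let n : Int := PySem.List.len lines
  let breaks := ((PySem.List.enumerate lines).filter
      (fun p => decide (0 < p.1) && isTopKeyB p.2)).map (fun p => p.1)
  let bounds := (0 : Int) :: (breaks ++ [n])
  let segments := (bounds.zip bounds.tail).map
    (fun ab => PySem.Str.strip (PySem.Str.join "\n" (PySem.List.slice lines (some ab.1) (some ab.2))))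
  segments.foldl (fun out seg =>
    if seg = "" then out
    else if PySem.Str.len seg ≤ 1800 then out ++ [seg]
    else out ++ fixedChunksB seg) []

-- ===== PRECONDITION & SPEC =====
def Spec_chunk_yaml (text : String) (out : List String) : Prop := out = chunk_yaml_alt text
instance (text : String) (out : List String) : Decidable (Spec_chunk_yaml text out) := by unfold Spec_chunk_yaml; infer_instance

-- ===== CLAIM (what is proved, stated in full; the proofs are below) =====
def Claim_equal_chunk_yaml : Prop := ∀ (text : String), Dom_chunk_yaml text → Spec_chunk_yaml text (chunk_yaml text)

-- ===== LEMMAS AND PROOFS =====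

-- strip is idempotent
theorem pv_dropWhile_dropWhile (p : Char → Bool) (l : List Char) :
    List.dropWhile p (List.dropWhile p l) = List.dropWhile p l := by
  induction l with
  | nil => rfl
  | cons a t ih =>
    by_cases h : p a
    · simp [h, ih]
    · simp [h]

theorem pv_rstrip_idem (l : List Char) :
    PySem.Chars.rstrip (PySem.Chars.rstrip l) = PySem.Chars.rstrip l := by
  simp [PySem.Chars.rstrip, pv_dropWhile_dropWhile]

theorem pv_lstrip_rstrip_lstrip (l : List Char) :
    PySem.Chars.lstrip (PySem.Chars.rstrip (PySem.Chars.lstrip l))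
      = PySem.Chars.rstrip (PySem.Chars.lstrip l) := by
  set p := PySem.Chars.isspace with hp
  set y := PySem.Chars.lstrip l with hy
  have hyd : List.dropWhile p y = y := by rw [hy]; exact pv_dropWhile_dropWhile p l
  have hpre : PySem.Chars.rstrip y <+: y := by
    have := (List.dropWhile_suffix p (l := y.reverse)).reverse
    simpa [PySem.Chars.rstrip] using this
  obtain ⟨tl, htl⟩ := hpre
  show List.dropWhile p (PySem.Chars.rstrip y) = PySem.Chars.rstrip y
  cases hc : PySem.Chars.rstrip y with
  | nil => rfl
  | cons a u =>
    have hya : y = a :: (u ++ tl) := by rw [← htl, hc]; simp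
    have hna : ¬ p a = true := by
      intro hpa
      have h1 : List.dropWhile p y = List.dropWhile p (u ++ tl) := by
        rw [hya]; exact List.dropWhile_cons_of_pos hpa
      rw [hyd] at h1
      have h2 := List.length_dropWhile_le p (u ++ tl)
      have h3 := congrArg List.length h1
      rw [hya] at h3
      simp at h3
      have h4 : (u ++ tl).length = u.length + tl.length := by simp
      omega
    exact List.dropWhile_cons_of_neg hna

theorem pv_strip_idem (s : String) : PySem.Str.strip (PySem.Str.strip s) = PySem.Str.strip s := by
  apply String.toList_inj.mp
  simp only [PySem.Str.toList_strip]
  simp [PySem.Chars.strip, pv_lstrip_rstrip_lstrip, pv_rstrip_idem]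

-- join-then-strip of a group of lines
def pvJ (g : List String) : String := PySem.Str.strip (PySem.Str.join "\n" g)

theorem pv_strip_pvJ (g : List String) : PySem.Str.strip (pvJ g) = pvJ g := by
  simp [pvJ, pv_strip_idem]

-- grouping of the lines at top-level keys (proof-side specification)
def pvDone (cur : List String) : List String → List (List String)
  | [] => []
  | l :: t => if isTopKeyB l then cur :: pvDone [l] t else pvDone (cur ++ [l]) t

def pvLast (cur : List String) : List String → List String
  | [] => cur
  | l :: t => if isTopKeyB l then pvLast [l] t else pvLast (cur ++ [l]) t

def pvPos : List String → List Nat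
  | [] => []
  | l :: t => (if isTopKeyB l then [0] else []) ++ (pvPos t).map (· + 1)

theorem pv_last_ne_nil (ls : List String) (cur : List String) (h : cur ≠ []) :
    pvLast cur ls ≠ [] := by
  induction ls generalizing cur with
  | nil => simpa [pvLast] using h
  | cons l t ih =>
    by_cases hk : isTopKeyB l
    · simpa [pvLast, hk] using ih [l] (by simp)
    · simpa [pvLast, hk] using ih (cur ++ [l]) (by simp)

-- A's accumulate-and-flush fold computes the grouping
theorem pv_foldA (ls : List String) (chunks cur : List String) (h : cur ≠ []) :
    ls.foldl (fun (st : List String × List String) line =>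
      if (decide (line ≠ "") && !(PySem.Str.startswith line " " || PySem.Str.startswith line "\t")
          && PySem.Str.endswith (PySem.Str.strip line) ":" && !(PySem.Str.startswith (PySem.Str.strip line) "-"))
         && !st.2.isEmpty then
        (st.1 ++ [PySem.Str.strip (PySem.Str.join "\n" st.2)], [line])
      else
        (st.1, st.2 ++ [line])) (chunks, cur)
    = (chunks ++ (pvDone cur ls).map pvJ, pvLast cur ls) := by
  induction ls generalizing chunks cur with
  | nil => simp [pvDone, pvLast]
  | cons l t ih =>
    have hcur : cur.isEmpty = false := by simpa [List.isEmpty_iff] using h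
    by_cases hk : isTopKeyB l
    · have hk' : (decide (l ≠ "") && !(PySem.Str.startswith l " " || PySem.Str.startswith l "\t")
          && PySem.Str.endswith (PySem.Str.strip l) ":" && !(PySem.Str.startswith (PySem.Str.strip l) "-")) = true := by
        simpa [isTopKeyB] using hk
      simp only [List.foldl_cons, hk', hcur]
      rw [if_pos (by simp)]
      rw [ih _ [l] (by simp)]
      simp [pvDone, pvLast, hk, pvJ]
    · have hk' : (decide (l ≠ "") && !(PySem.Str.startswith l " " || PySem.Str.startswith l "\t")
          && PySem.Str.endswith (PySem.Str.strip l) ":" && !(PySem.Str.startswith (PySem.Str.strip l) "-")) = false := by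
        simpa [isTopKeyB] using hk
      simp only [List.foldl_cons, hk']
      rw [if_neg (by simp)]
      rw [ih _ (cur ++ [l]) (by simp)]
      simp [pvDone, pvLast, hk]

-- B's bounds/zip/slice segments compute the same grouping
def pvSegs (L : List String) (bs : List Nat) : List (List String) :=
  ((0 :: bs ++ [L.length]).zip (bs ++ [L.length])).map
    (fun ab => (L.drop ab.1).take (ab.2 - ab.1))

theorem pv_segs_shift (L' cur : List String) (bs : List Nat) :
    (((cur.length :: bs.map (· + cur.length) ++ [cur.length + L'.length]).zip
        (bs.map (· + cur.length) ++ [cur.length + L'.length])).map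
      (fun ab => ((cur ++ L').drop ab.1).take (ab.2 - ab.1)))
    = pvSegs L' bs := by
  have h1 : (cur.length :: bs.map (· + cur.length) ++ [cur.length + L'.length])
      = (0 :: bs ++ [L'.length]).map (· + cur.length) := by
    simp [Nat.add_comm]
  have h2 : (bs.map (· + cur.length) ++ [cur.length + L'.length])
      = (bs ++ [L'.length]).map (· + cur.length) := by
    simp [Nat.add_comm]
  rw [h1, h2, List.zip_map, List.map_map]
  unfold pvSegs
  apply List.map_congr_left
  rintro ⟨a, b⟩ hmem
  simp only [Function.comp, Prod.map]
  have hd : (cur ++ L').drop (a + cur.length) = L'.drop a := by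
    rw [List.drop_append]
    simp
  rw [hd]
  congr 1
  omega

theorem pv_segs_eq (rest : List String) (cur : List String) (h : cur ≠ []) :
    pvSegs (cur ++ rest) ((pvPos rest).map (· + cur.length))
      = pvDone cur rest ++ [pvLast cur rest] := by
  induction rest generalizing cur with
  | nil =>
    simp [pvPos, pvSegs, pvDone, pvLast, List.take_of_length_le]
  | cons x t ih =>
    by_cases hk : isTopKeyB x
    · have hpos : pvPos (x :: t) = 0 :: (pvPos t).map (· + 1) := by simp [pvPos, hk]
      rw [hpos]
      have hshift := pv_segs_shift (x :: t) cur ((pvPos t).map (· + 1))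
      have hihx : pvSegs (x :: t) ((pvPos t).map (· + 1)) = pvDone [x] t ++ [pvLast [x] t] := by
        have := ih [x] (by simp)
        simpa using this
      rw [hihx] at hshift
      unfold pvSegs
      simp only [List.map_cons, List.cons_append, List.zip_cons_cons, List.map_cons,
        List.length_append, List.length_cons]
      have hhead : List.take (0 + cur.length - 0) (List.drop 0 (cur ++ x :: t)) = cur := by simp
      rw [hhead, show (0 + cur.length) = cur.length by omega,
        show cur.length + (t.length + 1) = cur.length + (x :: t).length by simp]
      simp only [List.cons_append] at hshift
      rw [hshift]
      simp [pvDone, pvLast, hk]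
    · have hpos : pvPos (x :: t) = (pvPos t).map (· + 1) := by simp [pvPos, hk]
      rw [hpos]
      have hlines : cur ++ x :: t = (cur ++ [x]) ++ t := by simp
      have hmm : ((pvPos t).map (· + 1)).map (· + cur.length)
          = (pvPos t).map (· + (cur ++ [x]).length) := by
        rw [List.map_map]; apply List.map_congr_left; intro j _; simp; omega
      rw [hlines, hmm, ih (cur ++ [x]) (by simp)]
      simp [pvDone, pvLast, hk]

theorem pv_breaks_eq (ls : List String) (s : Int) (hs : 1 ≤ s) :
    ((PySem.List.enumerate ls s).filter
      (fun p => decide (0 < p.1) && isTopKeyB p.2)).map (fun p => p.1)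
    = (pvPos ls).map (fun j : Nat => s + (j : Int)) := by
  induction ls generalizing s with
  | nil => simp [PySem.List.enumerate_nil, pvPos]
  | cons l t ih =>
    have hpos : decide ((0:Int) < s) = true := by simp; omega
    have harith : ((pvPos t).map (· + 1)).map (fun j : Nat => s + (j:Int))
        = (pvPos t).map (fun j : Nat => (s+1) + (j:Int)) := by
      rw [List.map_map]; apply List.map_congr_left; intro j _
      simp [Function.comp]; ring
    by_cases hk : isTopKeyB l
    · simp [PySem.List.enumerate_cons, hpos, hk, pvPos, harith, ih (s + 1) (by omega)]
    · simp [PySem.List.enumerate_cons, hpos, hk, pvPos, harith, ih (s + 1) (by omega)]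

-- pyRange with step 1050
theorem pv_pyr_nil (a b : Int) (h : b ≤ a) : PySem.List.pyRange a b 1050 = [] := by
  rw [PySem.List.pyRange_of_pos _ _ (by norm_num : (0:Int) < 1050)]
  rw [if_neg (by omega)]
  simp

theorem pv_pyr_cons (a b : Int) (h : a < b) :
    PySem.List.pyRange a b 1050 = a :: PySem.List.pyRange (a + 1050) b 1050 := by
  rw [PySem.List.pyRange_of_pos _ _ (by norm_num : (0:Int) < 1050),
      PySem.List.pyRange_of_pos _ _ (by norm_num : (0:Int) < 1050)]
  have hq1 : 1 ≤ (b - a + 1050 - 1) / 1050 := by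
    rw [Int.le_ediv_iff_mul_le (by norm_num)]; omega
  have hq2 : (b - (a + 1050) + 1050 - 1) / 1050 = (b - a + 1050 - 1) / 1050 - 1 := by
    have he : b - (a + 1050) + 1050 - 1 = (b - a + 1050 - 1) + (-1) * 1050 := by ring
    rw [he, Int.add_mul_ediv_right _ _ (by norm_num : (1050:Int) ≠ 0)]; ring
  rw [if_pos h]
  by_cases hb : a + 1050 < b
  · rw [if_pos hb, hq2]
    have hsplit : ((b - a + 1050 - 1) / 1050).toNat = ((b - a + 1050 - 1) / 1050 - 1).toNat + 1 := by
      omega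
    rw [hsplit, List.range_succ_eq_map, List.map_cons, List.map_map]
    congr 1
    · simp
    · apply List.map_congr_left; intro k _; simp [Function.comp]; ring
  · rw [if_neg hb]
    have hqlt : (b - a + 1050 - 1) / 1050 < 2 := by
      rw [Int.ediv_lt_iff_lt_mul (by norm_num)]; omega
    have h1 : ((b - a + 1050 - 1) / 1050).toNat = 1 := by omega
    rw [h1]
    simp

-- the last window is clamped by min but the closed form is not; the slices agree
theorem pv_slice_clamp (t : String) (start : Nat) (h : t.toList.length ≤ start + 1200) :
    PySem.Str.slice t (some (start : Int)) (some ((min (start + 1200) t.toList.length : Nat) : Int))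
      = PySem.Str.slice t (some (start : Int)) (some ((start : Int) + 1200)) := by
  apply String.toList_inj.mp
  have hcast : ((start:Int) + 1200) = ((start + 1200 : Nat) : Int) := by push_cast; ring
  rw [hcast]
  simp only [PySem.Str.slice, String.toList_ofList, PySem.Chars.slice_eq_listSlice,
    PySem.List.slice_natCast]
  rw [List.take_of_length_le (by rw [List.length_drop]; omega),
      List.take_of_length_le (by rw [List.length_drop]; omega)]

-- the while loop of fixed_chunk_text equals the closed-form map/filter
theorem pv_loopA_eq (t : String) (start : Nat) (acc : List String)
    (h : (start : Int) < max ((t.toList.length : Int) - 150) 1) :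
    pvFixedLoopA t t.toList.length start acc
    = acc ++ ((PySem.List.pyRange (start : Int) (max ((t.toList.length : Int) - 150) 1) 1050).map
        (fun s => PySem.Str.strip (PySem.Str.slice t (some s) (some (s + 1200))))).filter
        (fun p => decide (p ≠ "")) := by
  rw [pvFixedLoopA]
  by_cases hstop : t.toList.length ≤ min (start + 1200) t.toList.length
  · have hle : t.toList.length ≤ start + 1200 := by omega
    rw [if_pos hstop]
    rw [pv_pyr_cons _ _ h, pv_pyr_nil _ _ (by omega)]
    simp only [List.map_cons, List.map_nil, List.filter_cons, List.filter_nil]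
    rw [pv_slice_clamp t start hle]
    by_cases hc : PySem.Str.strip (PySem.Str.slice t (some (start : Int)) (some ((start : Int) + 1200))) = ""
    · simp [hc]
    · simp [hc]
  · have hlt : start + 1200 < t.toList.length := by omega
    have hmin : min (start + 1200) t.toList.length = start + 1200 := by omega
    rw [if_neg hstop]
    have harg : min (start + 1200) t.toList.length - 150 = start + 1050 := by omega
    rw [harg]
    have hnext : ((start + 1050 : Nat) : Int) < max ((t.toList.length : Int) - 150) 1 := by
      push_cast; omega
    rw [pv_loopA_eq t (start + 1050) _ hnext]
    rw [pv_pyr_cons _ _ h]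
    simp only [List.map_cons, List.filter_cons]
    rw [hmin]
    push_cast
    by_cases hc : PySem.Str.strip (PySem.Str.slice t (some (start : Int)) (some ((start : Int) + 1200))) = ""
    · simp [hc]
    · simp [hc]
termination_by t.toList.length - start
decreasing_by omega

theorem pv_fixed_eq (c : String) : fixed_chunk_textA c = fixedChunksB c := by
  unfold fixed_chunk_textA fixedChunksB
  by_cases ht : PySem.Str.strip c = ""
  · simp [ht]
  · simp only [ht]
    have hL : (PySem.Str.len (PySem.Str.strip c)).toNat = (PySem.Str.strip c).toList.length := by
      simp [PySem.Str.len]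
    rw [hL]
    have h0 : ((0 : Nat) : Int) < max (((PySem.Str.strip c).toList.length : Int) - 150) 1 := by
      simp
    rw [pv_loopA_eq (PySem.Str.strip c) 0 [] h0]
    simp [PySem.Str.len]

theorem pv_final_fold (zs : List String) (acc : List String)
    (h : ∀ z ∈ zs, PySem.Str.strip z = z) :
    zs.foldl (fun final chunk =>
      let c := PySem.Str.strip chunk
      if c = "" then final
      else if PySem.Str.len c ≤ 1800 then final ++ [c]
      else final ++ fixed_chunk_textA c) acc
    = zs.foldl (fun out seg =>
      if seg = "" then out
      else if PySem.Str.len seg ≤ 1800 then out ++ [seg]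
      else out ++ fixedChunksB seg) acc := by
  induction zs generalizing acc with
  | nil => rfl
  | cons z t ih =>
    have hz : PySem.Str.strip z = z := h z (by simp)
    rw [List.foldl_cons, List.foldl_cons]
    have hv : (let c := PySem.Str.strip z;
        if c = "" then acc else if PySem.Str.len c ≤ 1800 then acc ++ [c] else acc ++ fixed_chunk_textA c)
        = (if z = "" then acc else if PySem.Str.len z ≤ 1800 then acc ++ [z] else acc ++ fixedChunksB z) := by
      show (if PySem.Str.strip z = "" then acc else if PySem.Str.len (PySem.Str.strip z) ≤ 1800
        then acc ++ [PySem.Str.strip z] else acc ++ fixed_chunk_textA (PySem.Str.strip z)) = _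
      rw [hz, pv_fixed_eq]
    rw [hv]
    exact ih _ (fun x hx => h x (by simp [hx]))

-- assembling the two sides
theorem pv_chunkA_eq (text : String) (l : String) (rest : List String)
    (hl : PySem.Str.splitlines text = l :: rest) :
    chunk_yaml text = split_large_chunksA ((pvDone [l] rest ++ [pvLast [l] rest]).map pvJ) := by
  unfold chunk_yaml
  rw [hl]
  simp only [List.foldl_cons, List.isEmpty_nil, Bool.not_true, Bool.and_false,
    Bool.false_eq_true, if_false, List.nil_append]
  rw [pv_foldA rest [] [l] (by simp)]
  have hne := pv_last_ne_nil rest [l] (by simp)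
  have hie : (pvLast [l] rest).isEmpty = false := by simpa [List.isEmpty_iff] using hne
  simp [hie, pvJ]

theorem pv_chunkB_eq (text : String) (l : String) (rest : List String)
    (hl : PySem.Str.splitlines text = l :: rest) :
    chunk_yaml_alt text
    = ((pvDone [l] rest ++ [pvLast [l] rest]).map pvJ).foldl (fun out seg =>
        if seg = "" then out
        else if PySem.Str.len seg ≤ 1800 then out ++ [seg]
        else out ++ fixedChunksB seg) [] := by
  unfold chunk_yaml_alt
  rw [hl]
  simp only [List.tail_cons]
  congr 1
  have hbr : (List.map (fun p => p.1)
      (List.filter (fun p => decide (0 < p.1) && isTopKeyB p.2) (PySem.List.enumerate (l :: rest))))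
      = ((pvPos rest).map (· + 1)).map (fun j : Nat => (j : Int)) := by
    rw [PySem.List.enumerate_cons, List.filter_cons]
    rw [if_neg (by simp)]
    rw [show (0:Int) + 1 = 1 from by norm_num]
    rw [pv_breaks_eq rest 1 (by norm_num)]
    rw [List.map_map]
    apply List.map_congr_left; intro j _
    simp [Function.comp]
    ring
  have hn : PySem.List.len (l :: rest) = ((rest.length + 1 : Nat) : Int) := by
    simp [PySem.List.len]
  rw [hbr, hn]
  have h1 : ((0:Int) :: (((pvPos rest).map (· + 1)).map (fun j : Nat => (j:Int)) ++ [((rest.length + 1 : Nat) : Int)]))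
      = (0 :: ((pvPos rest).map (· + 1)) ++ [rest.length + 1]).map (fun j : Nat => (j:Int)) := by
    simp
  have h2 : (((pvPos rest).map (· + 1)).map (fun j : Nat => (j:Int)) ++ [((rest.length + 1 : Nat) : Int)])
      = (((pvPos rest).map (· + 1)) ++ [rest.length + 1]).map (fun j : Nat => (j:Int)) := by
    simp
  rw [h1, h2, List.zip_map, List.map_map]
  have h3 : ((fun ab : Int × Int => PySem.Str.strip (PySem.Str.join "\n" (PySem.List.slice (l :: rest) (some ab.1) (some ab.2))))
        ∘ Prod.map (fun j : Nat => (j:Int)) (fun j : Nat => (j:Int)))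
      = fun ab : Nat × Nat => pvJ (((l :: rest).drop ab.1).take (ab.2 - ab.1)) := by
    funext ab
    simp only [Function.comp, Prod.map, PySem.List.slice_natCast, pvJ]
  rw [h3]
  have h4 : ((0 :: ((pvPos rest).map (· + 1)) ++ [rest.length + 1]).zip (((pvPos rest).map (· + 1)) ++ [rest.length + 1])).map
        (fun ab : Nat × Nat => pvJ (((l :: rest).drop ab.1).take (ab.2 - ab.1)))
      = (pvSegs (l :: rest) ((pvPos rest).map (· + 1))).map pvJ := by
    rw [pvSegs, List.map_map]
    simp [Function.comp]
  rw [h4]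
  congr 1
  have := pv_segs_eq rest [l] (by simp)
  simpa using this

theorem chunk_yaml_spec : Claim_equal_chunk_yaml := by
  intro text _
  unfold Spec_chunk_yaml
  cases hl : PySem.Str.splitlines text with
  | nil =>
    unfold chunk_yaml chunk_yaml_alt
    rw [hl]
    rfl
  | cons l rest =>
    rw [pv_chunkA_eq text l rest hl, pv_chunkB_eq text l rest hl]
    unfold split_large_chunksA
    apply pv_final_fold
    intro z hz
    simp only [List.mem_map] at hz
    obtain ⟨g, -, rfl⟩ := hz
    exact pv_strip_pvJ g
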